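-- pv_equiv track=rewrite | github.com/wyk18703232953/myResearch | codeComplex/data/filteredData/python/logn/python_logn_0219.py | solve
-- ===== SOURCE A (Python) =====
-- def d(num: int) -> int:
--     ret = 0
--     num = list(str(num))
--     for i in range(len(num)):
--         ret += int(num[i])
--     return ret
--
-- def solve(n: int, s: int) -> int:
--     l, h = 0, n
--     for _ in range(2000):
--         m = (l + h) // 2
--         if m - d(m) >= s:
--             h = m
--         else:
--             l = m
--     # 局部微调，寻找最小满足条件的 t
--     for i in range(-100, 100):
--         t = m + i
--         if t < 0 or t > n:
--             continue
--         if abs(t - d(t)) >= s: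
--             return n - t + 1
--     return 0
-- ===== SOURCE B (Python) =====
-- def d(num: int) -> int:
--     ret = 0
--     while num > 0:
--         ret += num % 10
--         num //= 10
--     return ret
--
-- def solve(n: int, s: int) -> int:
--     # f(t) = t - d(t) >= s forces t >= s, and d(t) <= 90 for every t <= 2**31 + 100,
--     # so the least satisfying t (if any) lies in [max(0,s), max(0,s)+100].
--     lo = max(0, s)
--     hi = min(n, lo + 100)
--     for t in range(lo, hi + 1):
--         if t - d(t) >= s:
--             return n - t + 1
--     return 0
-- ===== Notes on version B (the rewrite author's own statement) =====
-- stated objective: faster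
-- what changed: Replaces A's 2000-iteration binary search plus a +/-100 local fixup scan with a direct scan of the only window [max(0,s), max(0,s)+100] that can contain the least t with t - digitsum(t) >= s (digitsum <= 90 for all admitted t), and computes the digit sum arithmetically instead of via str().
import Mathlib
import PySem

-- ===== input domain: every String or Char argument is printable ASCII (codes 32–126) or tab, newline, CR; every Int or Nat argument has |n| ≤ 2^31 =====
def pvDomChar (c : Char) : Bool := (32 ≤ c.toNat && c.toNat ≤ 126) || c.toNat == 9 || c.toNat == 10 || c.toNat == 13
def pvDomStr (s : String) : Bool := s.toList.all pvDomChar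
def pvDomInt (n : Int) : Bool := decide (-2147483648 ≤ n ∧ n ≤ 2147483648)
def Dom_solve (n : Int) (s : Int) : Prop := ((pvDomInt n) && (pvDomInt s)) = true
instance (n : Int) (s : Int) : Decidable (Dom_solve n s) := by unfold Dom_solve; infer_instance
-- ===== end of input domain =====

-- B replaces A's fixed 2000-round binary search plus ±100 local fixup by a single bounded scan
-- (at most 101 candidates) of the one window [max(0,s), max(0,s)+100] that can contain the least
-- satisfying t, with an arithmetic digit sum instead of str(); objective: faster by a constant factor.

-- ===== PORT A =====
-- d(num): sum of int(c) over the characters of str(num); int of the 1-char string is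
-- PySem.Int.ofChars? [c] (exact; '.getD 0' is never reached under Pre_: every char is a digit).
def dA (num : Int) : Int :=
  let cs := (PySem.Int.toStr num).toList
  (PySem.List.pyRange 0 (PySem.List.len cs) 1).foldl
    (fun ret i => ret + (PySem.Int.ofChars? [PySem.List.pyGetD cs i ' ']).getD 0) 0

-- one iteration of A's 'for _ in range(2000)' body over the state (l, h, m)
def solveStep (s : Int) (st : Int × Int × Int) : Int × Int × Int :=
  let m := PySem.Int.floordiv (st.1 + st.2.1) 2
  if m - dA m ≥ s then (st.1, m, m) else (m, st.2.1, m)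

-- A's local fixup scan: first i in range(-100, 100) with 0 <= m+i <= n and abs(m+i - d(m+i)) >= s
-- gives 'return n - (m+i) + 1'; falling through gives 'return 0'
def solveFix (n s m : Int) : Int :=
  match (PySem.List.pyRange (-100) 100 1).find?
      (fun i => decide (0 ≤ m + i ∧ m + i ≤ n ∧ s ≤ |(m + i) - dA (m + i)|)) with
  | some i => n - (m + i) + 1
  | none => 0

def solve (n : Int) (s : Int) : Int :=
  -- the m-slot of the initial state is never read: the loop runs 2000 > 0 times
  let st := (PySem.List.pyRange 0 2000 1).foldl (fun st _ => solveStep s st) (0, n, 0)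
  solveFix n s st.2.2

-- ===== PORT B =====
-- B's d: arithmetic digit sum, 'while num > 0: ret += num % 10; num //= 10'
def dAlt (num : Int) : Int :=
  if _h : 0 < num then PySem.Int.mod num 10 + dAlt (PySem.Int.floordiv num 10) else 0
termination_by num.toNat
decreasing_by
  rw [PySem.Int.floordiv_eq_ediv_of_pos (by norm_num)]
  omega

def solve_alt (n : Int) (s : Int) : Int :=
  let lo := max 0 s
  let hi := min n (lo + 100)
  match (PySem.List.pyRange lo (hi + 1) 1).find? (fun t => decide (s ≤ t - dAlt t)) with
  | some t => n - t + 1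
  | none => 0

-- ===== PRECONDITION & SPEC =====
-- Pre_: n ≥ 0; for n < 0 the first loop calls d on a negative midpoint and int('-') raises ValueError.
def Pre_solve (n : Int) (s : Int) : Prop := 0 ≤ n
instance (n : Int) (s : Int) : Decidable (Pre_solve n s) := by unfold Pre_solve; infer_instance
def pvWitness_solve : Int × Int := (30, 5)

def Spec_solve (n : Int) (s : Int) (out : Int) : Prop := out = solve_alt n s
instance (n : Int) (s : Int) (out : Int) : Decidable (Spec_solve n s out) := by unfold Spec_solve; infer_instance

-- ===== CLAIM (what is proved, stated in full; the proofs are below) =====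
def Claim_equal_solve : Prop := ∀ (n : Int) (s : Int), Dom_solve n s → Pre_solve n s → Spec_solve n s (solve n s)

-- ===== LEMMAS AND PROOFS =====

-- unfolding equation of dAlt
theorem dAlt_eq (num : Int) :
    dAlt num = if 0 < num then PySem.Int.mod num 10 + dAlt (PySem.Int.floordiv num 10) else 0 := by
  rw [dAlt]; split <;> simp_all

theorem dAlt_of_pos {num : Int} (h : 0 < num) :
    dAlt num = num % 10 + dAlt (num / 10) := by
  rw [dAlt_eq, if_pos h, PySem.Int.floordiv_eq_ediv_of_pos (by norm_num),
    PySem.Int.mod_eq_emod_of_pos (by norm_num)]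

theorem dAlt_nonneg (t : Int) : 0 ≤ dAlt t := by
  by_cases h : 0 < t
  · rw [dAlt_of_pos h]
    have := dAlt_nonneg (t / 10)
    omega
  · rw [dAlt_eq, if_neg h]
termination_by t.toNat
decreasing_by omega

theorem dAlt_le_self (t : Int) (ht : 0 ≤ t) : dAlt t ≤ t := by
  by_cases h : 0 < t
  · rw [dAlt_of_pos h]
    have := dAlt_le_self (t / 10) (by omega)
    omega
  · rw [dAlt_eq, if_neg h]; omega
termination_by t.toNat
decreasing_by omega

-- digit sum of anything below 10^k is at most 9k
theorem dAlt_le_of_lt_pow (k : Nat) (t : Int) (ht : 0 ≤ t) (hlt : t < 10 ^ k) :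
    dAlt t ≤ 9 * k := by
  induction k generalizing t with
  | zero =>
    norm_num at hlt
    have : t = 0 := by omega
    subst this
    rw [dAlt_eq]; norm_num
  | succ k ih =>
    by_cases h : 0 < t
    · rw [dAlt_of_pos h]
      have h1 : t / 10 < 10 ^ k := by
        rw [pow_succ] at hlt
        omega
      have := ih (t / 10) (by omega) h1
      push_cast
      omega
    · rw [dAlt_eq, if_neg h]; positivity

-- digit sum increases by at most one from t to t+1
theorem dAlt_succ_le (t : Int) (ht : 0 ≤ t) : dAlt (t + 1) ≤ dAlt t + 1 := by
  by_cases h : 0 < t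
  · rw [dAlt_of_pos (by omega), dAlt_of_pos h]
    by_cases h9 : t % 10 = 9
    · have hdiv : (t + 1) / 10 = t / 10 + 1 := by omega
      have hmod : (t + 1) % 10 = 0 := by omega
      have := dAlt_succ_le (t / 10) (by omega)
      rw [hdiv, hmod]
      omega
    · have hdiv : (t + 1) / 10 = t / 10 := by omega
      have hmod : (t + 1) % 10 = t % 10 + 1 := by omega
      rw [hdiv, hmod]
      omega
  · have : t = 0 := by omega
    subst this
    have hz : dAlt 0 = 0 := by rw [dAlt_eq]; norm_num
    have ho : dAlt (0 + 1) = 1 := by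
      rw [show (0 : Int) + 1 = 1 from rfl, dAlt_of_pos one_pos]
      norm_num [hz]
    rw [hz, ho]
    norm_num
termination_by t.toNat
decreasing_by omega

-- t ↦ t - digitsum t is monotone on the nonnegatives
theorem sub_dAlt_mono {a b : Int} (ha : 0 ≤ a) (hab : a ≤ b) :
    a - dAlt a ≤ b - dAlt b := by
  obtain ⟨k, hk⟩ : ∃ k : Nat, b = a + k := ⟨(b - a).toNat, by omega⟩
  subst hk
  clear hab
  induction k with
  | zero => simp
  | succ k ih =>
    have := dAlt_succ_le (a + k) (by positivity)
    push_cast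
    rw [show a + ((k : Int) + 1) = a + (k : Int) + 1 from by ring]
    omega

-- value that A's port reads out of a single digit character
def chVal (c : Char) : Int := (PySem.Int.ofChars? [c]).getD 0

theorem chVal_digitChar (d : Nat) (hd : d < 10) : chVal (Nat.digitChar d) = d := by
  interval_cases d <;> decide

-- the char-value sum of Nat.toDigitsCore is dAlt plus the accumulator's sum
theorem sum_toDigitsCore (fuel : Nat) : ∀ (n : Nat) (acc : List Char), n < 10 ^ fuel →
    ((Nat.toDigitsCore 10 fuel n acc).map chVal).sum = dAlt n + ((acc.map chVal)).sum := by
  induction fuel with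
  | zero =>
    intro n acc hn
    have : n = 0 := by omega
    subst this
    simp [Nat.toDigitsCore, dAlt_eq]
  | succ fuel ih =>
    intro n acc hn
    have hz0 : dAlt ((0 : Nat) : Int) = 0 := by rw [dAlt_eq]; norm_num
    show ((if n / 10 = 0 then (n % 10).digitChar :: acc
        else Nat.toDigitsCore 10 fuel (n / 10) ((n % 10).digitChar :: acc)).map chVal).sum =
      dAlt n + (acc.map chVal).sum
    by_cases h0 : n / 10 = 0
    · have hn10 : n < 10 := by omega
      rw [if_pos h0]
      by_cases hz : n = 0
      · subst hz
        simp [chVal_digitChar 0 (by norm_num)]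
        exact_mod_cast hz0
      · rw [dAlt_of_pos (by exact_mod_cast Nat.pos_of_ne_zero hz)]
        have h1 : ((n : Int)) / 10 = ((0 : Nat) : Int) := by push_cast; omega
        have h2 : ((n : Int)) % 10 = (n : Int) := by omega
        rw [h1, h2, hz0]
        simp only [List.map_cons, List.sum_cons, Nat.mod_eq_of_lt hn10]
        rw [chVal_digitChar n hn10]
        ring
    · rw [if_neg h0, ih (n / 10) _ (by rw [pow_succ] at hn; omega)]
      have hpos : 0 < (n : Int) := by exact_mod_cast Nat.pos_of_ne_zero (by omega)
      rw [dAlt_of_pos hpos]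
      have h1 : ((n : Int)) / 10 = ((n / 10 : Nat) : Int) := by omega
      have h2 : ((n : Int)) % 10 = ((n % 10 : Nat) : Int) := by omega
      rw [h1, h2]
      simp [chVal_digitChar (n % 10) (by omega)]
      ring

theorem dA_eq_dAlt (m : Int) (hm : 0 ≤ m) : dA m = dAlt m := by
  unfold dA
  simp only [PySem.Int.toList_toStr, PySem.List.len_eq]
  rw [PySem.List.foldl_pyRange_zero_pyGetD' (PySem.Int.toChars m) ' '
        (fun ret c => ret + (PySem.Int.ofChars? [c]).getD 0) 0,
      PySem.List.foldl_add]
  have hchars : PySem.Int.toChars m = Nat.toDigits 10 m.toNat := by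
    unfold PySem.Int.toChars
    rw [if_neg (by omega)]
  rw [hchars]
  unfold Nat.toDigits
  have := sum_toDigitsCore (m.toNat + 1) m.toNat []
    (lt_of_lt_of_le (Nat.lt_pow_self (by norm_num)) (Nat.pow_le_pow_right (by norm_num) (by omega)))
  simp only [List.map_nil, List.sum_nil, add_zero] at this
  show 0 + ((Nat.toDigitsCore 10 (m.toNat + 1) m.toNat []).map chVal).sum = dAlt m
  rw [this, show ((m.toNat : Nat) : Int) = m from by omega]
  omega

-- the condition 'this t satisfies t - digitsum(t) >= s'
abbrev Cond (s t : Int) : Prop := s ≤ t - dAlt t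

-- the loop invariant of A's binary search (on the l and h components)
def InvLH (n s : Int) (st : Int × Int × Int) : Prop :=
  0 ≤ st.1 ∧ st.1 ≤ st.2.1 ∧ st.2.1 ≤ n ∧
    (st.1 = 0 ∨ ¬ Cond s st.1) ∧ (st.2.1 = n ∨ Cond s st.2.1)

theorem solveStep_props {n s : Int} {st : Int × Int × Int} (h : InvLH n s st) :
    InvLH n s (solveStep s st) ∧
    (solveStep s st).2.1 - (solveStep s st).1 ≤ (st.2.1 - st.1 + 1) / 2 ∧
    ((solveStep s st).2.2 = (solveStep s st).1 ∨ (solveStep s st).2.2 = (solveStep s st).2.1) := by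
  obtain ⟨h0, hlh, hhn, hl, hh⟩ := h
  unfold solveStep
  set m := PySem.Int.floordiv (st.1 + st.2.1) 2 with hm
  obtain ⟨hml, hmh⟩ := PySem.Int.floordiv_two_mid_bounds hlh
  have hmfloor : m = (st.1 + st.2.1) / 2 := by
    rw [hm, PySem.Int.floordiv_eq_ediv_of_pos (by norm_num)]
  have hda : dA m = dAlt m := dA_eq_dAlt m (by omega)
  by_cases hc : m - dA m ≥ s
  · rw [if_pos hc]
    have hcm : Cond s m := by unfold Cond; rw [hda] at hc; omega
    exact ⟨⟨h0, hml, by show m ≤ n; omega, hl, Or.inr hcm⟩, by dsimp only; omega, Or.inr rfl⟩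
  · rw [if_neg hc]
    have hcm : ¬ Cond s m := by unfold Cond; rw [hda] at hc; omega
    exact ⟨⟨by show (0:Int) ≤ m; omega, hmh, hhn, Or.inr hcm, hh⟩, by dsimp only; omega, Or.inl rfl⟩

-- after k rounds from width ≤ 2^k the interval has width ≤ 1 (and the invariant holds)
theorem iter_props (n s : Int) (k : Nat) : ∀ (st : Int × Int × Int), InvLH n s st →
    st.2.1 - st.1 ≤ 2 ^ k →
    InvLH n s ((solveStep s)^[k] st) ∧
      ((solveStep s)^[k] st).2.1 - ((solveStep s)^[k] st).1 ≤ 1 := by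
  induction k with
  | zero => intro st h hw; simpa using ⟨h, by simpa using hw⟩
  | succ k ih =>
    intro st h hw
    obtain ⟨hinv, hwid, _⟩ := solveStep_props h
    rw [Function.iterate_succ_apply]
    refine ih _ hinv ?_
    have h2 : (2:Int) ^ (k + 1) = 2 * 2 ^ k := by ring
    have h2k : (0:Int) < 2 ^ k := by positivity
    omega

-- a fold of a state-only function over range(0,k) is k-fold iteration
theorem foldl_const_iterate {α : Type} (f : α → α) (k : Nat) : ∀ (init : α),
    (PySem.List.pyRange 0 (k : Int) 1).foldl (fun st _ => f st) init = f^[k] init := by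
  induction k with
  | zero => intro init; simp
  | succ k ih =>
    intro init
    have : ((k : Int) + 1) = ((k + 1 : Nat) : Int) := by push_cast; ring
    rw [← this, PySem.List.pyRange_one_succ_right (by positivity), List.foldl_append,
      Function.iterate_succ_apply', ih]
    rfl

-- find? over an ascending unit range returns the least element satisfying p
theorem find?_pyRange_some (p : Int → Bool) (x : Int) : ∀ (a : Int), ∀ (b : Int), a ≤ x → x < b →
    p x = true → (∀ y, a ≤ y → y < x → p y = false) →
    (PySem.List.pyRange a b 1).find? p = some x := by
  intro a
  induction hk : (x - a).toNat generalizing a with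
  | zero =>
    intro b hax hxb hp _
    have : a = x := by omega
    subst this
    rw [PySem.List.pyRange_one_cons hxb, List.find?_cons_of_pos hp]
  | succ k ih =>
    intro b hax hxb hp hmin
    have hax' : a < x := by omega
    rw [PySem.List.pyRange_one_cons (by omega), List.find?_cons_of_neg (by simp [hmin a le_rfl hax'])]
    exact ih (a + 1) (by omega) b (by omega) hxb hp (fun y hy1 hy2 => hmin y (by omega) hy2)

theorem find?_pyRange_none (p : Int → Bool) (b : Int) : ∀ (a : Int),
    (∀ y, a ≤ y → y < b → p y = false) → (PySem.List.pyRange a b 1).find? p = none := by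
  intro a
  induction hk : (b - a).toNat generalizing a with
  | zero =>
    intro _
    rw [PySem.List.pyRange_one_eq_nil (by omega)]
    rfl
  | succ k ih =>
    intro hall
    rw [PySem.List.pyRange_one_cons (by omega),
      List.find?_cons_of_neg (by simp [hall a le_rfl (show a < b by omega)])]
    exact ih (a + 1) (by omega) (fun y h1 h2 => hall y (by omega) h2)


-- A's port with the 2000-round foldl written as function iteration
theorem solve_eq_iter (n s : Int) :
    solve n s = solveFix n s (((solveStep s)^[2000] ((0 : Int), n, (0 : Int))).2.2) := by
  have h1 : solve n s = solveFix n s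
      (((PySem.List.pyRange 0 2000 1).foldl (fun st _ => solveStep s st) (0, n, 0)).2.2) := rfl
  rw [h1, show (2000 : Int) = ((2000 : Nat) : Int) from by norm_num, foldl_const_iterate]

-- B's port with its lets inlined
theorem solve_alt_eq (n s : Int) :
    solve_alt n s =
      (match (PySem.List.pyRange (max 0 s) (min n (max 0 s + 100) + 1) 1).find?
          (fun t => decide (s ≤ t - dAlt t)) with
       | some t => n - t + 1
       | none => 0) := by
  unfold solve_alt
  rfl

-- the abs test of A's fixup scan is the plain condition on [0, n]
theorem absCond_iff (s t : Int) (ht : 0 ≤ t) : (s ≤ |t - dA t|) ↔ Cond s t := by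
  rw [dA_eq_dAlt t ht, abs_of_nonneg (by have := dAlt_le_self t ht; omega)]

theorem cond_mono {s a b : Int} (ha : 0 ≤ a) (hab : a ≤ b) (hc : Cond s a) : Cond s b := by
  have := sub_dAlt_mono ha hab
  omega

-- ===== VERDICT (by name: the statement is the Claim_ definition above) =====
theorem solve_spec : Claim_equal_solve := by
  intro n s hdom hpre
  unfold Spec_solve
  simp only [Dom_solve, pvDomInt, Bool.and_eq_true, decide_eq_true_eq] at hdom
  obtain ⟨⟨hn1, hn2⟩, hs1, hs2⟩ := hdom
  have hpre' : (0 : Int) ≤ n := hpre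
  -- the state after the binary-search loop, made opaque behind an existential
  have hInv0 : InvLH n s (0, n, 0) := ⟨le_refl 0, hpre', le_refl n, Or.inl rfl, Or.inl rfl⟩
  have hpow : ∀ k : Nat, 31 ≤ k → (0, n, 0).2.1 - (0, n, 0).1 ≤ 2 ^ k := by
    intro k hk
    calc (0, n, 0).2.1 - (0, n, 0).1 = n := by dsimp only; ring
      _ ≤ 2147483648 := hn2
      _ = 2 ^ 31 := by norm_num
      _ ≤ 2 ^ k := pow_le_pow_right₀ (by norm_num) hk
  have hstep : (solveStep s)^[2000] ((0 : Int), n, (0 : Int)) =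
      solveStep s ((solveStep s)^[1999] ((0 : Int), n, (0 : Int))) := by
    rw [show (2000 : Nat) = 1999 + 1 from rfl, Function.iterate_succ_apply']
  clear hpre
  have hSt : ∃ st : Int × Int × Int, InvLH n s st ∧ st.2.1 - st.1 ≤ 1 ∧
      (st.2.2 = st.1 ∨ st.2.2 = st.2.1) ∧
      (solveStep s)^[2000] ((0 : Int), n, (0 : Int)) = st := by
    obtain ⟨hinv', _⟩ := iter_props n s 1999 (0, n, 0) hInv0 (hpow 1999 (by norm_num))
    obtain ⟨_, hwid⟩ := iter_props n s 2000 (0, n, 0) hInv0 (hpow 2000 (by norm_num))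
    obtain ⟨hinvF', _, hmF⟩ := solveStep_props hinv'
    rw [← hstep] at hinvF' hmF
    exact ⟨_, hinvF', hwid, hmF, rfl⟩
  obtain ⟨stF, ⟨hl0, hlh, hhn, hl, hh⟩, hwid, hmF, hfeq⟩ := hSt
  rw [solve_eq_iter, hfeq, solve_alt_eq]
  unfold solveFix
  set lo := max 0 s with hlo
  set hi := min n (lo + 100) with hhi
  by_cases hex : ∃ k : Nat, ((k : Int) ≤ n ∧ Cond s (k : Int))
  · -- a satisfying t exists; both sides return n - t0 + 1 for the least such t0
    have hT : ∃ t0 : Int, 0 ≤ t0 ∧ t0 ≤ n ∧ Cond s t0 ∧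
        ∀ y : Int, 0 ≤ y → y < t0 → ¬ Cond s y := by
      obtain ⟨ht0n, hct0⟩ := Nat.find_spec hex
      refine ⟨(Nat.find hex : Int), Int.natCast_nonneg _, ht0n, hct0, ?_⟩
      intro y hy0 hyt hc
      refine Nat.find_min hex (m := y.toNat) (by omega) ⟨?_, ?_⟩ <;>
        rw [show ((y.toNat : Nat) : Int) = y from by omega]
      · omega
      · exact hc
    obtain ⟨t0, ht00, ht0n, hct0, hminT⟩ := hT
    have hlt0 : stF.1 ≤ t0 := by
      rcases hl with h0 | hnc
      · omega
      · by_contra hcon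
        exact hnc (cond_mono ht00 (by omega) hct0)
    have ht0h : t0 ≤ stF.2.1 := by
      rcases hh with hn' | hc
      · omega
      · by_contra hcon
        exact hminT stF.2.1 (by omega) (by omega) hc
    -- A's fixup scan finds t0 at offset t0 - m
    have hAfind : (PySem.List.pyRange (-100) 100 1).find?
        (fun i => decide (0 ≤ stF.2.2 + i ∧ stF.2.2 + i ≤ n ∧ s ≤ |(stF.2.2 + i) - dA (stF.2.2 + i)|))
        = some (t0 - stF.2.2) := by
      apply find?_pyRange_some
      · rcases hmF with h | h <;> rw [h] <;> omega
      · rcases hmF with h | h <;> rw [h] <;> omega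
      · simp only [decide_eq_true_eq]
        rw [show stF.2.2 + (t0 - stF.2.2) = t0 from by ring]
        exact ⟨ht00, ht0n, (absCond_iff s t0 ht00).mpr hct0⟩
      · intro y _ hy
        simp only [decide_eq_false_iff_not]
        rintro ⟨hy0, hyn, habs⟩
        exact hminT (stF.2.2 + y) hy0 (by omega) ((absCond_iff s _ hy0).mp habs)
    -- B's window scan finds t0 as well
    have hloT : lo ≤ t0 := by
      have h1 := dAlt_nonneg t0
      have h2 : s ≤ t0 - dAlt t0 := hct0
      omega
    have ht0hi : t0 ≤ hi := by
      rcases le_or_gt (lo + 100) n with hcase | hcase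
      · have hc100 : Cond s (lo + 100) := by
          have hb : dAlt (lo + 100) ≤ 9 * 10 := by
            apply dAlt_le_of_lt_pow 10 (lo + 100) (by omega)
            norm_num
            omega
          show s ≤ lo + 100 - dAlt (lo + 100)
          omega
        have : ¬ (lo + 100 < t0) := fun hcon => hminT (lo + 100) (by omega) hcon hc100
        omega
      · omega
    have hBfind : (PySem.List.pyRange lo (hi + 1) 1).find? (fun t => decide (s ≤ t - dAlt t))
        = some t0 := by
      apply find?_pyRange_some _ _ _ _ hloT (by omega)
      · simpa only [decide_eq_true_eq] using hct0
      · intro y hy1 hy2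
        simp only [decide_eq_false_iff_not]
        exact hminT y (by omega) hy2
    rw [hAfind, hBfind]
    show n - (stF.2.2 + (t0 - stF.2.2)) + 1 = n - t0 + 1
    ring
  · -- no satisfying t at all: both scans fail and both sides return 0
    have hnone : ∀ t : Int, 0 ≤ t → t ≤ n → ¬ Cond s t := by
      intro t h0 hn' hc
      apply hex
      refine ⟨t.toNat, ?_⟩
      rw [show ((t.toNat : Nat) : Int) = t from by omega]
      exact ⟨hn', hc⟩
    have hAfind : (PySem.List.pyRange (-100) 100 1).find?
        (fun i => decide (0 ≤ stF.2.2 + i ∧ stF.2.2 + i ≤ n ∧ s ≤ |(stF.2.2 + i) - dA (stF.2.2 + i)|))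
        = none := by
      apply find?_pyRange_none
      intro y _ _
      simp only [decide_eq_false_iff_not]
      rintro ⟨hy0, hyn, habs⟩
      exact hnone _ hy0 hyn ((absCond_iff s _ hy0).mp habs)
    have hBfind : (PySem.List.pyRange lo (hi + 1) 1).find? (fun t => decide (s ≤ t - dAlt t))
        = none := by
      apply find?_pyRange_none
      intro y hy1 hy2
      simp only [decide_eq_false_iff_not]
      exact hnone y (by omega) (by omega)
    rw [hAfind, hBfind]
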